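-- pv_equiv track=rewrite | github.com/Digital-Democracy-Project/votebot | src/votebot/updates/bill_version_sync.py | _get_best_text_url
-- ===== SOURCE A (Python) =====
-- def _get_best_text_url(version: dict) -> tuple[str, str] | None:
--     """Extract best URL + media_type from a version's links.
--
--     Priority: application/pdf first, then text/html.
--
--     Returns:
--         (url, media_type) tuple, or None if no usable links
--     """
--     links = version.get("links", [])
--     if not links:
--         return None
--
--     # Prefer PDF over HTML
--     pdf_link = None
--     html_link = None
--
--     for link in links:
--         url = link.get("url", "")
--         media_type = (link.get("media_type") or "").lower()
--
--         if not url: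
--             continue
--
--         if "application/pdf" in media_type:
--             pdf_link = (url, "application/pdf")
--         elif "text/html" in media_type:
--             html_link = (url, "text/html")
--         elif not pdf_link and not html_link:
--             # Unknown media type — keep as fallback
--             html_link = (url, media_type or "unknown")
--
--     return pdf_link or html_link
-- ===== SOURCE B (Python) =====
-- def _get_best_text_url(version: dict) -> tuple[str, str] | None:
--     """Pick best URL (PDF > HTML > first unknown) via separate filter passes."""
--     links = version.get("links", [])
--     cleaned = [(link.get("url", ""), (link.get("media_type") or "").lower())
--                for link in links]
--     cleaned = [(u, m) for u, m in cleaned if u]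
--
--     pdfs = [u for u, m in cleaned if "application/pdf" in m]
--     if pdfs:
--         return (pdfs[-1], "application/pdf")
--
--     htmls = [u for u, m in cleaned if "text/html" in m]
--     if htmls:
--         return (htmls[-1], "text/html")
--
--     # no pdf/html link at all: fall back to the first usable link
--     others = [(u, m or "unknown") for u, m in cleaned]
--     return others[0] if others else None
-- ===== Notes on version B (the rewrite author's own statement) =====
-- stated objective: simpler
-- what changed: Replaced A's single stateful loop carrying two mutable slots (with an order-dependent fallback branch) by independent filter passes over cleaned (url, lowercased media_type) pairs: last pdf match, else last html match, else the first usable link.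
import Mathlib
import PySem

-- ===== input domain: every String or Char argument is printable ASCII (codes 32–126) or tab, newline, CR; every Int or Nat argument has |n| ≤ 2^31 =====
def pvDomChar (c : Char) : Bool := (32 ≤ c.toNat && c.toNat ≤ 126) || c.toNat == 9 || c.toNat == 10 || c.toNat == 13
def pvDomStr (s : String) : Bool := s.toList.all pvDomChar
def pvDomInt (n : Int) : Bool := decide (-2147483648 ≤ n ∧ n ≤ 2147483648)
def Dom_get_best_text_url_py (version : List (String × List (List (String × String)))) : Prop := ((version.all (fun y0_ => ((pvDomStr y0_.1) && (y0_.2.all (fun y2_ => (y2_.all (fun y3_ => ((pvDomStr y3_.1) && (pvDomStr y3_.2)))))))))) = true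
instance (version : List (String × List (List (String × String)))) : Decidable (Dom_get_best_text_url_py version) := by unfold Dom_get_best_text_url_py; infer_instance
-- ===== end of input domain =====

-- B replaces A's single two-slot stateful loop by independent filter passes with a
-- priority selection (last pdf, else last html, else first usable link) — simpler.

-- ===== PORT A =====
-- the body of A's `for link in links` loop, over the state (pdf_link, html_link)
def pvStepA (st : Option (String × String) × Option (String × String))
    (link : List (String × String)) :
    Option (String × String) × Option (String × String) :=
  let url := (PySem.Dict.mk link).getD "url" ""
  let media_type := PySem.Str.lower ((PySem.Dict.mk link).getD "media_type" "")
  if url = "" then st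
  else if PySem.Str.isIn "application/pdf" media_type then
    (some (url, "application/pdf"), st.2)
  else if PySem.Str.isIn "text/html" media_type then
    (st.1, some (url, "text/html"))
  else if st.1 = none ∧ st.2 = none then
    (st.1, some (url, if media_type = "" then "unknown" else media_type))
  else st

def get_best_text_url_py (version : List (String × List (List (String × String)))) :
    Option (String × String) :=
  let links := (PySem.Dict.mk version).getD "links" []
  if links = [] then none
  else
    let st := links.foldl pvStepA (none, none)
    st.1.or st.2    -- `pdf_link or html_link` (tuples are truthy, None falsy)

-- ===== PORT B =====
-- (url, (media_type or "").lower()) of one link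
def pvNormB (link : List (String × String)) : String × String :=
  ((PySem.Dict.mk link).getD "url" "",
   PySem.Str.lower ((PySem.Dict.mk link).getD "media_type" ""))

def get_best_text_url_py_alt (version : List (String × List (List (String × String)))) :
    Option (String × String) :=
  let links := (PySem.Dict.mk version).getD "links" []
  let cleaned := (links.map pvNormB).filter (fun p => p.1 ≠ "")
  let pdfs := (cleaned.filter (fun p => PySem.Str.isIn "application/pdf" p.2)).map Prod.fst
  match pdfs.getLast? with   -- `if pdfs: return (pdfs[-1], …)`
  | some u => some (u, "application/pdf")
  | none =>
    let htmls := (cleaned.filter (fun p => PySem.Str.isIn "text/html" p.2)).map Prod.fst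
    match htmls.getLast? with
    | some u => some (u, "text/html")
    | none =>
      let others := cleaned.map (fun p => (p.1, if p.2 = "" then "unknown" else p.2))
      others.head?   -- `others[0] if others else None`

-- ===== PRECONDITION & SPEC =====
def Spec_get_best_text_url_py (version : List (String × List (List (String × String)))) (out : Option (String × String)) : Prop := out = get_best_text_url_py_alt version
instance (version : List (String × List (List (String × String)))) (out : Option (String × String)) : Decidable (Spec_get_best_text_url_py version out) := by unfold Spec_get_best_text_url_py; infer_instance

-- ===== CLAIM (what is proved, stated in full; the proofs are below) =====
def Claim_equal_get_best_text_url_py : Prop := ∀ (version : List (String × List (List (String × String)))), Dom_get_best_text_url_py version → Spec_get_best_text_url_py version (get_best_text_url_py version)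

-- ===== LEMMAS AND PROOFS =====

-- predicates over a cleaned (url, media_type) pair, and the fallback entry
def pvIsPdf (p : String × String) : Bool := PySem.Str.isIn "application/pdf" p.2
def pvIsHtml (p : String × String) : Bool := PySem.Str.isIn "text/html" p.2
def pvMkUnk (p : String × String) : String × String :=
  (p.1, if p.2 = "" then "unknown" else p.2)

def pvClean (links : List (List (String × String))) : List (String × String) :=
  (links.map pvNormB).filter (fun p => p.1 ≠ "")

-- spec-level values of A's two slots after the loop
def pvPdfLast (links : List (List (String × String))) : Option (String × String) :=
  ((pvClean links).filter pvIsPdf).getLast?.map (fun p => (p.1, "application/pdf"))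
def pvHtmlLast (links : List (List (String × String))) : Option (String × String) :=
  ((pvClean links).filter (fun p => !pvIsPdf p && pvIsHtml p)).getLast?.map
    (fun p => (p.1, "text/html"))
-- A's "unknown" fallback fires only while both slots are empty, hence only at the
-- FIRST usable link, and only if that link is neither pdf nor html
def pvUnkGuard (links : List (List (String × String))) : Option (String × String) :=
  match (pvClean links).head? with
  | some c => if pvIsPdf c ∨ pvIsHtml c then none else some (pvMkUnk c)
  | none => none

theorem pv_getLast?_cons (a : String × String) (t : List (String × String)) :
    (a :: t).getLast? = t.getLast?.or (some a) := by
  cases t with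
  | nil => rfl
  | cons b u =>
    rw [List.getLast?_cons_cons]
    cases h : (b :: u).getLast? with
    | none => simp [List.getLast?_eq_none_iff] at h
    | some c => rfl

theorem pv_or_some_absorb (x : Option (String × String)) (a : String × String)
    (y : Option (String × String)) : (x.or (some a)).or y = x.or (some a) := by
  cases x <;> rfl

theorem pv_map_or_some (f : String × String → String × String)
    (x : Option (String × String)) (a : String × String) :
    (x.or (some a)).map f = (x.map f).or (some (f a)) := by
  cases x <;> rfl

theorem pvClean_cons (l : List (String × String)) (ls : List (List (String × String))) :
    pvClean (l :: ls) =
      if (pvNormB l).1 = "" then pvClean ls else pvNormB l :: pvClean ls := by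
  simp only [pvClean, List.map_cons, List.filter_cons]
  split_ifs with h1 <;> simp_all

-- the loop invariant of A: both slots, as functions of the initial state
theorem pvLoopA_inv (links : List (List (String × String)))
    (p h : Option (String × String)) :
    (links.foldl pvStepA (p, h)).1 = (pvPdfLast links).or p ∧
    (links.foldl pvStepA (p, h)).2 =
      (pvHtmlLast links).or (if p = none ∧ h = none then pvUnkGuard links else h) := by
  induction links generalizing p h with
  | nil =>
    refine ⟨rfl, ?_⟩
    simp only [List.foldl_nil, pvHtmlLast, pvUnkGuard, pvClean, List.map_nil,
      List.filter_nil, List.getLast?_nil, Option.map_none, Option.none_or, List.head?_nil]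
    split_ifs with hc
    · exact hc.2
    · rfl
  | cons l ls ih =>
    simp only [List.foldl_cons]
    have hstep : pvStepA (p, h) l =
        if (pvNormB l).1 = "" then (p, h)
        else if pvIsPdf (pvNormB l) then (some ((pvNormB l).1, "application/pdf"), h)
        else if pvIsHtml (pvNormB l) then (p, some ((pvNormB l).1, "text/html"))
        else if p = none ∧ h = none then (p, some (pvMkUnk (pvNormB l)))
        else (p, h) := by
      simp only [pvStepA, pvNormB, pvIsPdf, pvIsHtml, pvMkUnk]
    by_cases hu : (pvNormB l).1 = ""
    · -- url empty: link skipped everywhere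
      rw [hstep, if_pos hu]
      have hP : pvPdfLast (l :: ls) = pvPdfLast ls := by
        unfold pvPdfLast; rw [pvClean_cons, if_pos hu]
      have hH : pvHtmlLast (l :: ls) = pvHtmlLast ls := by
        unfold pvHtmlLast; rw [pvClean_cons, if_pos hu]
      have hG : pvUnkGuard (l :: ls) = pvUnkGuard ls := by
        unfold pvUnkGuard; rw [pvClean_cons, if_pos hu]
      rw [hP, hH, hG]; exact ih p h
    · rw [hstep, if_neg hu]
      have hclean : pvClean (l :: ls) = pvNormB l :: pvClean ls := by
        rw [pvClean_cons, if_neg hu]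
      by_cases hp : pvIsPdf (pvNormB l) = true
      · -- pdf link: slot 1 overwritten, slot 2 untouched, fallback disabled after it
        rw [if_pos hp]
        have hP : pvPdfLast (l :: ls) =
            (pvPdfLast ls).or (some ((pvNormB l).1, "application/pdf")) := by
          unfold pvPdfLast
          rw [hclean, List.filter_cons_of_pos hp, pv_getLast?_cons, pv_map_or_some]
        have hH : pvHtmlLast (l :: ls) = pvHtmlLast ls := by
          unfold pvHtmlLast
          rw [hclean, List.filter_cons_of_neg (by simp [hp])]
        have hG : pvUnkGuard (l :: ls) = none := by
          unfold pvUnkGuard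
          rw [hclean]
          simp [hp]
        rw [hP, hH, hG]
        obtain ⟨ih1, ih2⟩ := ih (some ((pvNormB l).1, "application/pdf")) h
        refine ⟨by rw [ih1, pv_or_some_absorb], ?_⟩
        rw [ih2]
        simp only [reduceCtorEq, false_and, if_false]
        split_ifs with hc
        · rw [hc.2]
        · rfl
      · rw [if_neg hp]
        by_cases hh : pvIsHtml (pvNormB l) = true
        · -- html link: slot 2 overwritten, fallback disabled after it
          rw [if_pos hh]
          have hP : pvPdfLast (l :: ls) = pvPdfLast ls := by
            unfold pvPdfLast
            rw [hclean, List.filter_cons_of_neg (by simp [hp])]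
          have hH : pvHtmlLast (l :: ls) =
              (pvHtmlLast ls).or (some ((pvNormB l).1, "text/html")) := by
            unfold pvHtmlLast
            rw [hclean, List.filter_cons_of_pos (by simp [hp, hh]),
              pv_getLast?_cons, pv_map_or_some]
          have hG : pvUnkGuard (l :: ls) = none := by
            unfold pvUnkGuard
            rw [hclean]
            simp [hh]
          rw [hP, hH, hG]
          obtain ⟨ih1, ih2⟩ := ih p (some ((pvNormB l).1, "text/html"))
          refine ⟨ih1, ?_⟩
          rw [ih2]
          simp only [reduceCtorEq, and_false, if_false]
          split_ifs with hc
          · rw [pv_or_some_absorb]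
          · rw [pv_or_some_absorb]
        · -- unknown link: the fallback branch, live only while both slots are empty
          rw [if_neg hh]
          have hP : pvPdfLast (l :: ls) = pvPdfLast ls := by
            unfold pvPdfLast
            rw [hclean, List.filter_cons_of_neg (by simp [hp])]
          have hH : pvHtmlLast (l :: ls) = pvHtmlLast ls := by
            unfold pvHtmlLast
            rw [hclean, List.filter_cons_of_neg (by simp [hp, hh])]
          have hG : pvUnkGuard (l :: ls) = some (pvMkUnk (pvNormB l)) := by
            unfold pvUnkGuard
            rw [hclean]
            simp [hp, hh]
          rw [hP, hH, hG]
          by_cases hc : p = none ∧ h = none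
          · rw [if_pos hc, if_pos hc]
            obtain ⟨ih1, ih2⟩ := ih p (some (pvMkUnk (pvNormB l)))
            refine ⟨ih1, ?_⟩
            rw [ih2]
            simp only [reduceCtorEq, and_false, if_false]
          · simp only [if_neg hc]
            have hih := ih p h
            simp only [if_neg hc] at hih
            exact hih

-- A's result in closed form
theorem pvA_closed (links : List (List (String × String))) :
    (links.foldl pvStepA (none, none)).1.or (links.foldl pvStepA (none, none)).2 =
      (pvPdfLast links).or ((pvHtmlLast links).or (pvUnkGuard links)) := by
  obtain ⟨h1, h2⟩ := pvLoopA_inv links none none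
  rw [h1, h2, if_pos (⟨rfl, rfl⟩ : ((none : Option (String × String)) = none ∧ (none : Option (String × String)) = none))]
  cases pvPdfLast links <;> simp

theorem get_best_text_url_py_spec_aux (links : List (List (String × String))) :
    (if links = [] then none
     else (links.foldl pvStepA (none, none)).1.or (links.foldl pvStepA (none, none)).2) =
    (match (((links.map pvNormB).filter (fun p => p.1 ≠ "")).filter
        (fun p => PySem.Str.isIn "application/pdf" p.2)).map Prod.fst |>.getLast? with
     | some u => some (u, "application/pdf")
     | none =>
       match (((links.map pvNormB).filter (fun p => p.1 ≠ "")).filter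
           (fun p => PySem.Str.isIn "text/html" p.2)).map Prod.fst |>.getLast? with
       | some u => some (u, "text/html")
       | none =>
         (((links.map pvNormB).filter (fun p => p.1 ≠ "")).map
             (fun p => (p.1, if p.2 = "" then "unknown" else p.2))).head?) := by
  -- the `if not links` guard is redundant: on [] both sides are none
  rcases eq_or_ne links [] with rfl | hne
  · rfl
  rw [if_neg hne, pvA_closed]
  rw [show (fun p : String × String => PySem.Str.isIn "application/pdf" p.2) = pvIsPdf from rfl,
      show (fun p : String × String => PySem.Str.isIn "text/html" p.2) = pvIsHtml from rfl,
      show ((links.map pvNormB).filter (fun p => p.1 ≠ "")) = pvClean links from rfl]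
  rw [List.getLast?_map, List.getLast?_map]
  cases hpd : ((pvClean links).filter pvIsPdf).getLast? with
  | some c =>
    simp only [Option.map_some, pvPdfLast, hpd, Option.some_or]
  | none =>
    have hpnil : (pvClean links).filter pvIsPdf = [] := List.getLast?_eq_none_iff.mp hpd
    have hnopdf : ∀ p ∈ pvClean links, ¬ pvIsPdf p = true := by
      simpa using (List.filter_eq_nil_iff.mp hpnil)
    simp only [Option.map_none, pvPdfLast, hpd, Option.none_or]
    have hfilter : (pvClean links).filter (fun p => !pvIsPdf p && pvIsHtml p) =
        (pvClean links).filter pvIsHtml := by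
      apply List.filter_congr
      intro p hp
      have := hnopdf p hp
      simp [this]
    cases hht : ((pvClean links).filter pvIsHtml).getLast? with
    | some c =>
      simp only [Option.map_some, pvHtmlLast, hfilter, hht, Option.some_or]
    | none =>
      have hhnil : (pvClean links).filter pvIsHtml = [] := List.getLast?_eq_none_iff.mp hht
      have hnohtml : ∀ p ∈ pvClean links, ¬ pvIsHtml p = true := by
        simpa using (List.filter_eq_nil_iff.mp hhnil)
      simp only [Option.map_none, pvHtmlLast, hfilter, hht, Option.none_or]
      rw [show (fun p : String × String => (p.1, if p.2 = "" then "unknown" else p.2)) =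
        pvMkUnk from rfl, List.head?_map]
      unfold pvUnkGuard
      cases hhd : (pvClean links).head? with
      | none => rfl
      | some c =>
        have hc : c ∈ pvClean links := List.mem_of_mem_head? hhd
        simp [hnopdf c hc, hnohtml c hc]

-- ===== VERDICT (by name: the statement is the Claim_ definition above) =====
theorem get_best_text_url_py_spec : Claim_equal_get_best_text_url_py := by
  intro version _
  show get_best_text_url_py version = get_best_text_url_py_alt version
  unfold get_best_text_url_py get_best_text_url_py_alt
  exact get_best_text_url_py_spec_aux ((PySem.Dict.mk version).getD "links" [])
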